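-- pv_equiv track=rewrite | github.com/great-expectations/great_expectations | great_expectations/rule_based_profiler/types/data_assistant_result/data_assistant_result.py | _get_column_set_text
-- ===== SOURCE A (Python) =====
-- from typing import (
--     Any,
--     Callable,
--     Dict,
--     Iterable,
--     KeysView,
--     List,
--     Optional,
--     Set,
--     Tuple,
--     Union,
-- )
--
-- def _get_column_set_text(column_set: List[str]) -> Tuple[str, int]:
--     dy: int
--     if len(column_set) > 50:
--         text = f"All batches have the same set of columns. The number of columns ({len(column_set)}) is too long to list here."
--         dy = 0
--     else:
--         column_set_text: str = ""
--         idx: int = 1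
--         for column in column_set:
--             # line break for every 4 column names
--             if idx % 4 == 0:
--                 column_set_text += f"{column},$"
--             else:
--                 column_set_text += f"{column}, "
--             idx += 1
--         text = f"All batches have columns matching the set:${column_set_text[:-2]}."
--         dy = -100
--     return text, dy
-- ===== SOURCE B (Python) =====
-- def _get_column_set_text(column_set):
--     if len(column_set) > 50:
--         return (
--             f"All batches have the same set of columns. The number of columns ({len(column_set)}) is too long to list here.",
--             0,
--         )
--     # group-then-join: lines of 4 column names joined with ", ", lines joined with ",$"
--     lines = []
--     rest = column_set
--     while rest:
--         lines.append(", ".join(rest[:4]))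
--         rest = rest[4:]
--     body = ",$".join(lines)
--     return (f"All batches have columns matching the set:${body}.", -100)
-- ===== Notes on version B (the rewrite author's own statement) =====
-- stated objective: simpler
-- what changed: Replaces A's per-column loop with a 1-based modulo counter and the trailing [:-2] strip by grouping the columns into lines of 4 and a two-level join (', ' within a line, ',$' between lines), which never writes a separator that must be stripped.
import Mathlib
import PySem

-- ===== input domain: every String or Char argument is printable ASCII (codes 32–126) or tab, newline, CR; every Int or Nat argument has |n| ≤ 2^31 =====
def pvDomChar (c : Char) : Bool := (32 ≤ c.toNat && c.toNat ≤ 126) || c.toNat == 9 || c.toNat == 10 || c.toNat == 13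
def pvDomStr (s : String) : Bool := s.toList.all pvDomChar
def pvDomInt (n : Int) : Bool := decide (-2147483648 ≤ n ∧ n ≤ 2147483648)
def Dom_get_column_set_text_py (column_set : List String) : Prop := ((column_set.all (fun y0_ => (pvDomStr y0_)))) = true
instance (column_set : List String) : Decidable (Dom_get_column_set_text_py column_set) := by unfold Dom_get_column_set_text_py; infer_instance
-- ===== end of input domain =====

-- B replaces A's per-column loop with a modulo counter and trailing [:-2] strip by a
-- group-into-lines-of-4 then two-level join decomposition (objective: simpler).

-- ===== PORT A =====
def get_column_set_text_py (column_set : List String) : String × Int :=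
  if column_set.length > 50 then
    ("All batches have the same set of columns. The number of columns (" ++
       PySem.Int.toStr (column_set.length : Int) ++ ") is too long to list here.", 0)
  else
    let st := column_set.foldl
      (fun (st : String × Int) column =>
        if PySem.Int.mod st.2 4 == 0 then (st.1 ++ column ++ ",$", st.2 + 1)
        else (st.1 ++ column ++ ", ", st.2 + 1)) ("", 1)
    ("All batches have columns matching the set:$" ++
       PySem.Str.slice st.1 none (some (-2)) ++ ".", -100)

-- ===== PORT B =====
-- B's while-loop: peel off the first 4 names as one ", "-joined line until nothing is left
def pvLines (rest : List String) : List String :=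
  if h : rest = [] then []
  else
    PySem.Str.join ", " (PySem.List.slice rest none (some 4)) ::
      pvLines (PySem.List.slice rest (some 4) none)
termination_by rest.length
decreasing_by
  rw [PySem.List.slice_from (a := 4) rest (by omega)]
  cases rest with
  | nil => exact absurd rfl h
  | cons x xs => simp [List.length_drop]

def get_column_set_text_py_alt (column_set : List String) : String × Int :=
  if column_set.length > 50 then
    ("All batches have the same set of columns. The number of columns (" ++
       PySem.Int.toStr (column_set.length : Int) ++ ") is too long to list here.", 0)
  else
    ("All batches have columns matching the set:$" ++
       PySem.Str.join ",$" (pvLines column_set) ++ ".", -100)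

-- ===== PRECONDITION & SPEC =====
def Spec_get_column_set_text_py (column_set : List String) (out : String × Int) : Prop := out = get_column_set_text_py_alt column_set
instance (column_set : List String) (out : String × Int) : Decidable (Spec_get_column_set_text_py column_set out) := by unfold Spec_get_column_set_text_py; infer_instance

-- ===== CLAIM (what is proved, stated in full; the proofs are below) =====
def Claim_equal_get_column_set_text_py : Prop := ∀ (column_set : List String), Dom_get_column_set_text_py column_set → Spec_get_column_set_text_py column_set (get_column_set_text_py column_set)

-- ===== LEMMAS AND PROOFS =====

-- the separator A writes after the column at (1-based) position i
def pvSep (i : Int) : List Char :=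
  if PySem.Int.mod i 4 == 0 then [',', '$'] else [',', ' ']

-- what A's loop renders for the remaining columns l, starting at position i
def pvR : List String → Int → List Char
  | [], _ => []
  | c :: cs, i => c.toList ++ pvSep i ++ pvR cs (i + 1)

theorem pvSep_length (i : Int) : (pvSep i).length = 2 := by
  unfold pvSep; split <;> rfl

theorem pvSep_shift (i : Int) : pvSep (i + 4) = pvSep i := by
  unfold pvSep
  rw [PySem.Int.mod_eq_emod_of_pos (by omega), PySem.Int.mod_eq_emod_of_pos (by omega)]
  have h : (i + 4) % 4 = i % 4 := by omega
  rw [h]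

theorem pvR_shift (l : List String) (i : Int) : pvR l (i + 4) = pvR l i := by
  induction l generalizing i with
  | nil => rfl
  | cons c cs ih =>
    simp only [pvR, pvSep_shift]
    have h : i + 4 + 1 = i + 1 + 4 := by omega
    rw [h, ih]

-- A's loop, characterised
theorem pv_loop (l : List String) (t : String) (i : Int) :
    (l.foldl (fun (st : String × Int) column =>
        if PySem.Int.mod st.2 4 == 0 then (st.1 ++ column ++ ",$", st.2 + 1)
        else (st.1 ++ column ++ ", ", st.2 + 1)) (t, i)).1.toList
      = t.toList ++ pvR l i := by
  induction l generalizing t i with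
  | nil => simp [pvR]
  | cons c cs ih =>
    simp only [List.foldl_cons]
    by_cases h : PySem.Int.mod i 4 == 0
    · simp only [h, reduceIte, ih, pvR, pvSep]
      simp [List.append_assoc]
    · simp only [h, Bool.false_eq_true, reduceIte, ih, pvR, pvSep]
      simp [List.append_assoc]

-- B's lines, structurally
theorem pvLines_nil : pvLines [] = [] := by
  rw [pvLines.eq_def]; simp

theorem pvLines_cons (l : List String) (h : l ≠ []) :
    pvLines l = PySem.Str.join ", " (l.take 4) :: pvLines (l.drop 4) := by
  rw [pvLines.eq_def]
  simp [h, pysem]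

-- what B's join produces, at the char level
def pvJ (l : List String) : List Char :=
  PySem.Chars.join [',', '$'] ((pvLines l).map String.toList)

-- main invariant: A's rendered text is B's body followed by one trailing separator
theorem pv_main : ∀ n (l : List String), l.length ≤ n → l ≠ [] →
    pvR l 1 = pvJ l ++ pvSep (l.length : Int) := by
  intro n
  induction n with
  | zero =>
    intro l hl h
    cases l with
    | nil => exact absurd rfl h
    | cons x xs => simp at hl
  | succ n ih =>
    intro l hl h
    match l with
    | [] => exact absurd rfl h
    | [a] =>
      simp [pvR, pvJ, pvLines_cons, pvLines_nil, PySem.Str.toList_join,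
        PySem.Chars.join_singleton, pvSep, PySem.Int.mod]
    | [a, b] =>
      simp [pvR, pvJ, pvLines_cons, pvLines_nil, PySem.Str.toList_join,
        PySem.Chars.join_cons_cons, PySem.Chars.join_singleton, pvSep, PySem.Int.mod]
    | [a, b, c] =>
      simp [pvR, pvJ, pvLines_cons, pvLines_nil, PySem.Str.toList_join,
        PySem.Chars.join_cons_cons, PySem.Chars.join_singleton, pvSep, PySem.Int.mod]
    | a :: b :: c :: d :: rest =>
      by_cases hr : rest = []
      · subst hr
        simp [pvR, pvJ, pvLines_cons, pvLines_nil, PySem.Str.toList_join,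
          PySem.Chars.join_cons_cons, PySem.Chars.join_singleton, pvSep, PySem.Int.mod]
      · have hlen : rest.length ≤ n := by
          simp only [List.length_cons] at hl; omega
        have ihr := ih rest hlen hr
        obtain ⟨y, ys, hys⟩ : ∃ y ys, pvLines rest = y :: ys :=
          ⟨_, _, pvLines_cons rest hr⟩
        have h5 : pvR rest 5 = pvR rest 1 := by
          have h14 : (5:Int) = 1 + 4 := by norm_num
          rw [h14, pvR_shift]
        have hsep : pvSep (((a :: b :: c :: d :: rest).length : Nat) : Int)
            = pvSep ((rest.length : Nat) : Int) := by
          have hc : (((a :: b :: c :: d :: rest).length : Nat) : Int)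
              = ((rest.length : Nat) : Int) + 4 := by
            simp only [List.length_cons]; push_cast; omega
          rw [hc, pvSep_shift]
        have hL : pvR (a :: b :: c :: d :: rest) 1
            = a.toList ++ (',' :: ' ' :: (b.toList ++ (',' :: ' ' ::
              (c.toList ++ (',' :: ' ' :: (d.toList ++ (',' :: '$' :: pvR rest 1))))))) := by
          simp [pvR, pvSep, PySem.Int.mod, h5]
        have hR : pvJ (a :: b :: c :: d :: rest)
            = a.toList ++ (',' :: ' ' :: (b.toList ++ (',' :: ' ' ::
              (c.toList ++ (',' :: ' ' :: (d.toList ++ (',' :: '$' :: pvJ rest))))))) := by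
          rw [pvJ, pvLines_cons _ (by simp)]
          simp [pvJ, hys, PySem.Str.toList_join, PySem.Chars.join_cons_cons,
            PySem.Chars.join_singleton]
        rw [hL, hR, ihr, hsep]
        simp [List.append_assoc]

-- ===== VERDICT (by name: the statement is the Claim_ definition above) =====
theorem get_column_set_text_py_spec : Claim_equal_get_column_set_text_py := by
  intro l _
  unfold Spec_get_column_set_text_py get_column_set_text_py get_column_set_text_py_alt
  by_cases h50 : l.length > 50
  · simp [h50]
  · have hloop := pv_loop l "" 1
    have hbody : PySem.Str.slice
        (l.foldl (fun (st : String × Int) column =>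
          if PySem.Int.mod st.2 4 == 0 then (st.1 ++ column ++ ",$", st.2 + 1)
          else (st.1 ++ column ++ ", ", st.2 + 1)) ("", 1)).1 none (some (-2))
        = PySem.Str.join ",$" (pvLines l) := by
      unfold PySem.Str.slice PySem.Str.join
      congr 1
      rw [PySem.Chars.slice_eq_listSlice, hloop]
      simp only [show ("" : String).toList = [] from rfl, List.nil_append]
      by_cases hl : l = []
      · subst hl
        simp [pvR, pvLines_nil, PySem.Chars.join_nil, PySem.List.slice]
      · rw [pv_main l.length l le_rfl hl,
          PySem.List.slice_to_neg_ofNat _ 2 (by omega),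
          List.length_append, pvSep_length, Nat.add_sub_cancel, List.take_left]
        rfl
    simp only [h50, reduceIte]
    rw [hbody]
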